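-- pv_equiv track=rewrite | github.com/Suga7772/Deep-Learning-BWF-Mahrukh-Khan | Task 7/Passing List.py | make_great1
-- ===== SOURCE A (Python) =====
-- def make_great1(magicians):
--     great_magicians = []    # empty list
--     while magicians:
--         magician = magicians.pop()
--         great_magician = magician + ' the Great'
--         great_magicians.append(great_magician)
--     # Append the great magicians into the list
--     for great_magician in great_magicians:
--         magicians.append(great_magician)
--     return magicians
-- ===== SOURCE B (Python) =====
-- def make_great1(magicians):
--     # One pass over reversed(magicians), then slice-assign back in place
--     # (same in-place mutation of the argument as A, same return value).
--     great = [m + ' the Great' for m in reversed(magicians)]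
--     magicians[:] = great
--     return magicians
-- ===== Notes on version B (the rewrite author's own statement) =====
-- stated objective: idiomatic
-- what changed: Replaces A's two loops (stack-style pop-from-the-end into a scratch list, then re-append into the emptied argument) with a single comprehension over reversed(magicians) written back via slice assignment.
import Mathlib
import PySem

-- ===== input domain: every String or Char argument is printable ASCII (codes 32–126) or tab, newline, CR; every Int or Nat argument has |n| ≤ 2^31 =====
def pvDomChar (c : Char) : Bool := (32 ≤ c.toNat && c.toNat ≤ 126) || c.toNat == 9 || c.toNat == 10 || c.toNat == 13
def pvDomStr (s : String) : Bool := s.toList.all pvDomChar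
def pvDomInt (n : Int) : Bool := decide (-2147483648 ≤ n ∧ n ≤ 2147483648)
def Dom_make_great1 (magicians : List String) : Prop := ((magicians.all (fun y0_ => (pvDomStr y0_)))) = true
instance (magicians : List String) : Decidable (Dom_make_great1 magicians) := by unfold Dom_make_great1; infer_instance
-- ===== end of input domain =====

-- B replaces A's two-loop pop/re-append with one reversed-map pass (idiomatic); equivalence is about the return value; both Pythons mutate the argument in place identically.


-- ===== PORT A =====
-- while magicians: magician = magicians.pop(); great_magicians.append(magician + ' the Great')
def make_great1Loop (ms gs : List String) : List String :=
  match ms with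
  | [] => gs
  | m :: rest =>
      make_great1Loop (m :: rest).dropLast
        (gs ++ [((m :: rest).getLast (by simp)) ++ " the Great"])
termination_by ms.length
decreasing_by simp [List.length_dropLast]

-- after the while loop magicians is empty; the for loop re-appends great_magicians, return magicians
def make_great1 (magicians : List String) : List String :=
  make_great1Loop magicians []

-- ===== PORT B =====
def make_great1_alt (magicians : List String) : List String :=
  magicians.reverse.map (fun m => m ++ " the Great")

-- ===== PRECONDITION & SPEC =====
def Spec_make_great1 (magicians : List String) (out : List String) : Prop := out = make_great1_alt magicians
instance (magicians : List String) (out : List String) : Decidable (Spec_make_great1 magicians out) := by unfold Spec_make_great1; infer_instance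

-- ===== CLAIM (what is proved, stated in full; the proofs are below) =====
def Claim_equal_make_great1 : Prop := ∀ (magicians : List String), Dom_make_great1 magicians → Spec_make_great1 magicians (make_great1 magicians)

-- ===== LEMMAS AND PROOFS =====
theorem make_great1Loop_ne (ms : List String) (h : ms ≠ []) (gs : List String) :
    make_great1Loop ms gs = make_great1Loop ms.dropLast (gs ++ [ms.getLast h ++ " the Great"]) := by
  cases ms with
  | nil => exact absurd rfl h
  | cons m rest => conv_lhs => rw [make_great1Loop]

theorem make_great1Loop_eq (ms : List String) :
    ∀ gs, make_great1Loop ms gs = gs ++ ms.reverse.map (fun m => m ++ " the Great") := by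
  induction ms using List.reverseRecOn with
  | nil => intro gs; simp [make_great1Loop]
  | append_singleton xs x ih =>
      intro gs
      rw [make_great1Loop_ne (xs ++ [x]) (by simp), List.dropLast_concat,
        List.getLast_append_singleton (l := xs), ih]
      simp

-- ===== VERDICT (by name: the statement is the Claim_ definition above) =====
theorem make_great1_spec : Claim_equal_make_great1 := by
  intro magicians _
  unfold Spec_make_great1 make_great1 make_great1_alt
  rw [make_great1Loop_eq]
  simp
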